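-- pv_equiv track=rewrite | github.com/ckoons/BubbleSpacetimeTheory | play/toy_954_sat_linearization.py | compute_backbone
-- ===== SOURCE A (Python) =====
-- def compute_backbone(n, solutions):
--     """Find backbone variables: those fixed in ALL solutions."""
--     if not solutions:
--         return set(), {}
--
--     backbone = {}
--     for i in range(n):
--         vals = set(s[i] for s in solutions)
--         if len(vals) == 1:
--             backbone[i] = list(vals)[0]
--
--     return set(backbone.keys()), backbone
-- ===== SOURCE B (Python) =====
-- def compute_backbone(n, solutions):
--     """Find backbone variables: those fixed in ALL solutions."""
--     if not solutions:
--         return set(), {}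
--     merged = [solutions[0][i] for i in range(n)]
--     for s in solutions[1:]:
--         merged = [v if v is not None and s[i] == v else None
--                   for i, v in zip(range(n), merged)]
--     backbone = {i: v for i, v in zip(range(n), merged) if v is not None}
--     return set(backbone.keys()), backbone
-- ===== Notes on version B (the rewrite author's own statement) =====
-- stated objective: alternative
-- what changed: B replaces the per-variable value-set construction by a positional Option-array merge: a candidate list seeded from the first solution is folded pointwise over the remaining solutions (a surviving entry keeps its value, a disagreeing one becomes None), with no dict or set built during the scan.
import Mathlib
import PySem

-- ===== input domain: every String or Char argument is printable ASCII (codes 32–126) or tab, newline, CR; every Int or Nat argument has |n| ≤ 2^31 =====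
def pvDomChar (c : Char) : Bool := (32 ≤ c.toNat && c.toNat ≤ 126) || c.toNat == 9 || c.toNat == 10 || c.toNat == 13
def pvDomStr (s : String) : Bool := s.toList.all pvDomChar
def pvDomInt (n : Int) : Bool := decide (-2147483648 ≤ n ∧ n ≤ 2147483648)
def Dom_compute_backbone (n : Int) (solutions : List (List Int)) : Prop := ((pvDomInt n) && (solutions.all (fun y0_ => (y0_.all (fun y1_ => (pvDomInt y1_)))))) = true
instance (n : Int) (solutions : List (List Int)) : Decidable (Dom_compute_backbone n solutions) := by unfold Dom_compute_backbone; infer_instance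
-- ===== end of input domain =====

-- B replaces A's per-variable value-set pass by a positional Option-list merge folded over the
-- remaining solutions (no dict or set built during the scan): an alternative decomposition,
-- proved to return the same value on Pre_.

-- ===== PORT A =====
-- s[i] (Python raises IndexError when out of range) is ported as pyGetD with default 0;
-- Pre_compute_backbone excludes exactly the raising inputs, so the default is never the value used.
def compute_backbone (n : Int) (solutions : List (List Int)) : List Int × (List (Int × Int)) :=
  match solutions with
  | [] => ([], [])
  | _ :: _ =>
    let backbone : PySem.Dict Int Int :=
      (PySem.List.pyRange 0 n 1).foldl (fun b i =>
        let vals : PySem.Set Int := PySem.Set.ofList (solutions.map (fun s => PySem.List.pyGetD s i 0))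
        if PySem.Set.len vals = 1 then b.insert i (PySem.List.pyGetD vals 0 0) else b)
        PySem.Dict.empty
    (PySem.Set.ofList backbone.keys, backbone.items)

-- ===== PORT B =====
def compute_backbone_alt (n : Int) (solutions : List (List Int)) : List Int × (List (Int × Int)) :=
  match solutions with
  | [] => ([], [])
  | s0 :: rest =>
    let merged0 : List (Option Int) :=
      (PySem.List.pyRange 0 n 1).map (fun i => some (PySem.List.pyGetD s0 i 0))
    let merged : List (Option Int) :=
      rest.foldl (fun m s =>
        (List.zip (PySem.List.pyRange 0 n 1) m).map (fun p =>
          match p.2 with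
          | some v => if PySem.List.pyGetD s p.1 0 == v then some v else none
          | none => none)) merged0
    let backbone : List (Int × Int) :=
      (List.zip (PySem.List.pyRange 0 n 1) merged).filterMap
        (fun p => p.2.map (fun v => (p.1, v)))
    (PySem.Set.ofList (backbone.map Prod.fst), backbone)

-- ===== PRECONDITION & SPEC =====
-- Pre_ excludes exactly the inputs where Python A raises IndexError: a nonempty solution list
-- containing a row shorter than n.
def Pre_compute_backbone (n : Int) (solutions : List (List Int)) : Prop :=
  ∀ s ∈ solutions, n ≤ (s.length : Int)
instance (n : Int) (solutions : List (List Int)) : Decidable (Pre_compute_backbone n solutions) := by unfold Pre_compute_backbone; infer_instance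
def pvWitness_compute_backbone : Int × List (List Int) := (2, [[1, 0], [1, 1]])
def Spec_compute_backbone (n : Int) (solutions : List (List Int)) (out : List Int × (List (Int × Int))) : Prop := out = compute_backbone_alt n solutions
instance (n : Int) (solutions : List (List Int)) (out : List Int × (List (Int × Int))) : Decidable (Spec_compute_backbone n solutions out) := by unfold Spec_compute_backbone; infer_instance

-- ===== CLAIM (what is proved, stated in full; the proofs are below) =====
def Claim_equal_compute_backbone : Prop := ∀ (n : Int) (solutions : List (List Int)), Dom_compute_backbone n solutions → Pre_compute_backbone n solutions → Spec_compute_backbone n solutions (compute_backbone n solutions)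

-- ===== LEMMAS AND PROOFS =====

-- Canonical form both ports are reduced to.
def bbItems (n : Int) (s0 : List Int) (rest : List (List Int)) : List (Int × Int) :=
  ((PySem.List.pyRange 0 n 1).filter
      (fun i => rest.all (fun s => PySem.List.pyGetD s i 0 == PySem.List.pyGetD s0 i 0))).map
    (fun i => (i, PySem.List.pyGetD s0 i 0))

theorem dict_foldl_insert_if (c : Int → Prop) [DecidablePred c] (v : Int → Int) (l : List Int)
    (acc : List (Int × Int)) (hnd : l.Nodup) (hfresh : ∀ i ∈ l, ∀ p ∈ acc, p.1 ≠ i) :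
    l.foldl (fun b i => if c i then PySem.Dict.insert b i (v i) else b) (PySem.Dict.mk acc)
      = PySem.Dict.mk (acc ++ (l.filter (fun i => decide (c i))).map (fun i => (i, v i))) := by
  induction l generalizing acc with
  | nil => simp
  | cons a t ih =>
    have hna : a ∉ t := (List.nodup_cons.mp hnd).1
    have hnt : t.Nodup := (List.nodup_cons.mp hnd).2
    have hcontains : (PySem.Dict.mk acc : PySem.Dict Int Int).contains a = false := by
      simp only [PySem.Dict.contains, List.any_eq_false]
      intro p hp
      simpa using hfresh a (List.mem_cons_self ..) p hp
    simp only [List.foldl_cons]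
    by_cases hc : c a
    · rw [if_pos hc]
      have hins : (PySem.Dict.mk acc : PySem.Dict Int Int).insert a (v a) = PySem.Dict.mk (acc ++ [(a, v a)]) := by
        simp [PySem.Dict.insert, hcontains]
      rw [hins, ih (acc ++ [(a, v a)]) hnt]
      · simp [hc]
      · intro i hi p hp
        rcases List.mem_append.mp hp with h | h
        · exact hfresh i (List.mem_cons_of_mem _ hi) p h
        · simp only [List.mem_singleton] at h
          subst h
          show a ≠ i
          rintro rfl
          exact hna hi
    · rw [if_neg hc]
      rw [ih acc hnt (fun i hi => hfresh i (List.mem_cons_of_mem _ hi))]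
      simp [hc]

theorem set_cons_eq_singleton (a : Int) (xs : List Int) (h : xs.all (fun x => x == a) = true) :
    PySem.Set.ofList (a :: xs) = [a] := by
  have h0 : PySem.Set.ofList (a :: xs) = xs.foldl PySem.Set.add [a] := by
    simp [PySem.Set.ofList, PySem.Set.add, PySem.Set.empty, PySem.Set.contains]
  rw [h0]
  clear h0
  induction xs with
  | nil => rfl
  | cons x t ih =>
    simp only [List.all_cons, Bool.and_eq_true, beq_iff_eq] at h
    obtain ⟨rfl, ht⟩ := h
    simpa [PySem.Set.add, PySem.Set.contains] using ih ht

theorem set_cons_len_one (a : Int) (xs : List Int) :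
    PySem.Set.len (PySem.Set.ofList (a :: xs)) = 1 ↔ xs.all (fun x => x == a) = true := by
  constructor
  · intro h
    have hlen : (PySem.Set.ofList (a :: xs)).length = 1 := by
      simpa [PySem.Set.len] using h
    obtain ⟨y, hy⟩ := List.length_eq_one_iff.mp hlen
    have ha : a ∈ PySem.Set.ofList (a :: xs) := by
      rw [PySem.Set.mem_ofList]; exact List.mem_cons_self ..
    rw [hy] at ha
    simp only [List.mem_singleton] at ha
    subst ha
    rw [List.all_eq_true]
    intro x hx
    have hm : x ∈ PySem.Set.ofList (a :: xs) := by
      rw [PySem.Set.mem_ofList]; exact List.mem_cons_of_mem _ hx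
    rw [hy] at hm
    simpa using hm
  · intro h
    rw [set_cons_eq_singleton a xs h]
    rfl

-- A reduces to the canonical items list.
theorem A_eq_bbItems (n : Int) (s0 : List Int) (rest : List (List Int)) :
    compute_backbone n (s0 :: rest)
      = (PySem.Set.ofList ((bbItems n s0 rest).map Prod.fst), bbItems n s0 rest) := by
  have hA := dict_foldl_insert_if
    (fun i => PySem.Set.len (PySem.Set.ofList ((s0 :: rest).map (fun s => PySem.List.pyGetD s i 0))) = 1)
    (fun i => PySem.List.pyGetD (PySem.Set.ofList ((s0 :: rest).map (fun s => PySem.List.pyGetD s i 0))) 0 0)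
    (PySem.List.pyRange 0 n 1) [] (PySem.List.nodup_pyRange_one 0 n) (by simp)
  simp only [compute_backbone]
  rw [show (PySem.Dict.empty : PySem.Dict Int Int) = PySem.Dict.mk [] from rfl, hA]
  simp only [List.nil_append]
  have hfilter :
      (PySem.List.pyRange 0 n 1).filter
          (fun i => decide (PySem.Set.len (PySem.Set.ofList ((s0 :: rest).map (fun s => PySem.List.pyGetD s i 0))) = 1))
        = (PySem.List.pyRange 0 n 1).filter
          (fun i => rest.all (fun s => PySem.List.pyGetD s i 0 == PySem.List.pyGetD s0 i 0)) := by
    apply List.filter_congr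
    intro i _
    rw [Bool.eq_iff_iff, decide_eq_true_eq, List.map_cons, set_cons_len_one, List.all_map]
    simp [Function.comp]
  have hval : ∀ i ∈ (PySem.List.pyRange 0 n 1).filter
      (fun i => rest.all (fun s => PySem.List.pyGetD s i 0 == PySem.List.pyGetD s0 i 0)),
      (i, PySem.List.pyGetD (PySem.Set.ofList ((s0 :: rest).map (fun s => PySem.List.pyGetD s i 0))) 0 0)
        = (i, PySem.List.pyGetD s0 i 0) := by
    intro i hi
    rcases List.mem_filter.mp hi with ⟨-, hq⟩
    have hall : (rest.map (fun s => PySem.List.pyGetD s i 0)).all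
        (fun x => x == PySem.List.pyGetD s0 i 0) = true := by
      rw [List.all_map]
      simpa [Function.comp] using hq
    rw [List.map_cons, set_cons_eq_singleton _ _ hall]
    simp [PySem.List.pyGetD, PySem.List.pyGet?, PySem.List.pyIdx?]
  rw [hfilter]
  unfold bbItems
  rw [List.map_congr_left hval]
  simp [PySem.Dict.keys, List.map_map]

theorem zip_map_self {α β : Type} (l : List α) (g : α → β) :
    List.zip l (l.map g) = l.map (fun a => (a, g a)) := by
  induction l with
  | nil => rfl
  | cons a t ih => simp [ih]

theorem foldl_opt_none (rest : List (List Int)) (i : Int) :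
    rest.foldl (fun o s => match o with
      | some v => if PySem.List.pyGetD s i 0 == v then some v else none
      | none => none) (none : Option Int) = none := by
  induction rest with
  | nil => rfl
  | cons s t ih => simpa using ih

theorem foldl_opt_some (rest : List (List Int)) (i v : Int) :
    rest.foldl (fun o s => match o with
      | some v' => if PySem.List.pyGetD s i 0 == v' then some v' else none
      | none => none) (some v)
      = if rest.all (fun s => PySem.List.pyGetD s i 0 == v) then some v else none := by
  induction rest with
  | nil => rfl
  | cons s t ih =>
    have hstep : (match (some v : Option Int) with
        | some v' => if PySem.List.pyGetD s i 0 == v' then some v' else none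
        | none => none)
        = if PySem.List.pyGetD s i 0 == v then some v else none := rfl
    by_cases h : (PySem.List.pyGetD s i 0 == v) = true
    · rw [List.foldl_cons, hstep, if_pos h, ih, List.all_cons, h, Bool.true_and]
    · rw [List.foldl_cons, hstep, if_neg h, foldl_opt_none, List.all_cons]
      rw [Bool.not_eq_true] at h
      rw [h, Bool.false_and]
      simp

theorem foldl_pointwise (l : List Int) (rest : List (List Int)) (g : Int → Option Int) :
    rest.foldl (fun m s =>
        (List.zip l m).map (fun p =>
          match p.2 with
          | some v => if PySem.List.pyGetD s p.1 0 == v then some v else none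
          | none => none)) (l.map g)
      = l.map (fun i => rest.foldl (fun o s =>
          match o with
          | some v => if PySem.List.pyGetD s i 0 == v then some v else none
          | none => none) (g i)) := by
  induction rest generalizing g with
  | nil => rfl
  | cons s t ih =>
    simp only [List.foldl_cons, zip_map_self, List.map_map]
    exact ih _

theorem filterMap_ite {α β : Type} (p : α → Bool) (f : α → β) (l : List α) :
    l.filterMap (fun a => if p a then some (f a) else none) = (l.filter p).map f := by
  induction l with
  | nil => rfl
  | cons a t ih => by_cases h : p a = true <;> simp [h, ih]

-- B reduces to the same canonical items list.
theorem B_eq_bbItems (n : Int) (s0 : List Int) (rest : List (List Int)) :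
    compute_backbone_alt n (s0 :: rest)
      = (PySem.Set.ofList ((bbItems n s0 rest).map Prod.fst), bbItems n s0 rest) := by
  simp only [compute_backbone_alt]
  rw [foldl_pointwise, zip_map_self]
  have hfm :
      ((PySem.List.pyRange 0 n 1).map
          (fun i => (i, List.foldl (fun o s =>
            match o with
            | some v => if PySem.List.pyGetD s i 0 == v then some v else none
            | none => none) (some (PySem.List.pyGetD s0 i 0)) rest))).filterMap
        (fun p => p.2.map (fun v => (p.1, v)))
      = bbItems n s0 rest := by
    rw [List.filterMap_map]
    have hcongr : ∀ i ∈ PySem.List.pyRange 0 n 1,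
        ((fun p : Int × Option Int => p.2.map (fun v => (p.1, v))) ∘
          (fun i => (i, List.foldl (fun o s =>
            match o with
            | some v => if PySem.List.pyGetD s i 0 == v then some v else none
            | none => none) (some (PySem.List.pyGetD s0 i 0)) rest))) i
        = (fun i => if rest.all (fun s => PySem.List.pyGetD s i 0 == PySem.List.pyGetD s0 i 0)
            then some (i, PySem.List.pyGetD s0 i 0) else none) i := by
      intro i _
      simp only [Function.comp]
      rw [foldl_opt_some]
      by_cases h : rest.all (fun s => PySem.List.pyGetD s i 0 == PySem.List.pyGetD s0 i 0) = true
      · simp [h]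
      · simp [h]
    rw [List.filterMap_congr hcongr, filterMap_ite]
    rfl
  rw [hfm]

-- ===== VERDICT (by name: the statement is the Claim_ definition above) =====
theorem compute_backbone_spec : Claim_equal_compute_backbone := by
  intro n solutions _ _
  unfold Spec_compute_backbone
  cases solutions with
  | nil => rfl
  | cons s0 rest => rw [A_eq_bbItems, B_eq_bbItems]
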